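-- pv_equiv track=rewrite | github.com/Nareeek/Codesignal_tasks | number/pagesNumberingWithInk.py | pagesNumberingWithInk
-- ===== SOURCE A (Python) =====
-- def pagesNumberingWithInk(current, numberOfDigits):
--
--     def countDigitsInNumber(n):
--         count = 0
--         while n > 0:
--             count += 1
--             n //= 10
--         return count
--     digitsInCurrent = countDigitsInNumber(current)
--     while numberOfDigits >= digitsInCurrent:
--         numberOfDigits -= digitsInCurrent
--         current += 1
--         digitsInCurrent = countDigitsInNumber(current)
--     return current - 1
-- ===== SOURCE B (Python) =====
-- def pagesNumberingWithInk(current, numberOfDigits):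
--     # Process whole equal-digit-length blocks at once instead of page by page.
--     if numberOfDigits < 0:
--         return current - 1
--     d, p = 1, 10          # d-digit block is [p // 10, p - 1]
--     while True:
--         if current >= p:  # block lies entirely before current: skip it
--             d += 1
--             p *= 10
--             continue
--         cost = d * (p - current)   # ink to number every page current..p-1
--         if numberOfDigits < cost:
--             return current + numberOfDigits // d - 1
--         numberOfDigits -= cost
--         current = p
--         d += 1
--         p *= 10
-- ===== Notes on version B (the rewrite author's own statement) =====
-- stated objective: faster
-- what changed: Instead of decrementing the budget page by page, B consumes whole equal-digit-length blocks at once with one multiplication/division per block, O(log answer) instead of O(answer - current) iterations.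
-- outside the precondition, e.g. on pagesNumberingWithInk(0, 5): A returns 5, B returns 4; on pagesNumberingWithInk(-3, 2): A returns 2, B returns -2
import Mathlib
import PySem

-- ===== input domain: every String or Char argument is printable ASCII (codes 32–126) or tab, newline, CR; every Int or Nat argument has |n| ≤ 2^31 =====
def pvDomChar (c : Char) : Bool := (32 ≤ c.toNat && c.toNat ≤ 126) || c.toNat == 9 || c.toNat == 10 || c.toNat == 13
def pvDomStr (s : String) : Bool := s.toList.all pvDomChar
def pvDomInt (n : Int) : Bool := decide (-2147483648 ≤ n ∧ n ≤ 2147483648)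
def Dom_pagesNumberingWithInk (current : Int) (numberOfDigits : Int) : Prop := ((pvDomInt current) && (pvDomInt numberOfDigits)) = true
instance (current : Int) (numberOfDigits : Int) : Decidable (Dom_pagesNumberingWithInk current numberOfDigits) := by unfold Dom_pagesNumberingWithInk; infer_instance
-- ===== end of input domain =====

-- B numbers whole equal-digit-length blocks at once (one division per block) instead of
-- page by page; equivalence is proved on the natural domain current ≥ 1.
-- (Loops are ported with a fuel parameter as a totality guard; the fuel is provably
-- sufficient, see pvALoop_eq_ref / pvBlockLoop_eq below.)

-- ===== PORT A =====
-- while n > 0: count += 1; n //= 10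
def pvCountLoop : Nat → Int → Int → Int
  | 0, _, count => count
  | fuel + 1, n, count =>
    if 0 < n then pvCountLoop fuel (PySem.Int.floordiv n 10) (count + 1) else count

def pvCountDigits (n : Int) : Int := pvCountLoop n.toNat n 0

-- while numberOfDigits >= digitsInCurrent: numberOfDigits -= digitsInCurrent; current += 1
def pvALoop : Nat → Int → Int → Int
  | 0, current, _ => current - 1
  | fuel + 1, current, numberOfDigits =>
    if pvCountDigits current ≤ numberOfDigits then
      pvALoop fuel (current + 1) (numberOfDigits - pvCountDigits current)
    else current - 1

def pagesNumberingWithInk (current : Int) (numberOfDigits : Int) : Int :=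
  pvALoop ((numberOfDigits + 1).toNat + (1 - current).toNat) current numberOfDigits

-- ===== PORT B =====
-- B's main loop: skip the d-digit block if it lies before `current`, else consume it
-- in bulk (or finish inside it with one division).
def pvBlockLoop : Nat → Int → Int → Int → Int → Int
  | 0, current, _, _, _ => current - 1
  | fuel + 1, current, numberOfDigits, d, p =>
    if p ≤ current then
      pvBlockLoop fuel current numberOfDigits (d + 1) (p * 10)
    else if numberOfDigits < d * (p - current) then
      current + PySem.Int.floordiv numberOfDigits d - 1
    else
      pvBlockLoop fuel p (numberOfDigits - d * (p - current)) (d + 1) (p * 10)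

def pagesNumberingWithInk_alt (current : Int) (numberOfDigits : Int) : Int :=
  if numberOfDigits < 0 then current - 1
  else pvBlockLoop ((current + 1 - 10).toNat + numberOfDigits.toNat + 1) current numberOfDigits 1 10

-- ===== PRECONDITION & SPEC =====
-- Pre_ restricts to the task's natural domain of page numbers, current ≥ 1: for
-- current ≤ 0 A charges zero digits to every nonpositive page number, an artefact of
-- its digit counter, and B does not reproduce that.
def Pre_pagesNumberingWithInk (current : Int) (numberOfDigits : Int) : Prop := 1 ≤ current
instance (current : Int) (numberOfDigits : Int) : Decidable (Pre_pagesNumberingWithInk current numberOfDigits) := by unfold Pre_pagesNumberingWithInk; infer_instance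
def pvWitness_pagesNumberingWithInk : Int × Int := (1, 11)

def Spec_pagesNumberingWithInk (current : Int) (numberOfDigits : Int) (out : Int) : Prop := out = pagesNumberingWithInk_alt current numberOfDigits
instance (current : Int) (numberOfDigits : Int) (out : Int) : Decidable (Spec_pagesNumberingWithInk current numberOfDigits out) := by unfold Spec_pagesNumberingWithInk; infer_instance

-- ===== CLAIM (what is proved, stated in full; the proofs are below) =====
def Claim_equal_pagesNumberingWithInk : Prop := ∀ (current : Int) (numberOfDigits : Int), Dom_pagesNumberingWithInk current numberOfDigits → Pre_pagesNumberingWithInk current numberOfDigits → Spec_pagesNumberingWithInk current numberOfDigits (pagesNumberingWithInk current numberOfDigits)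

-- ===== LEMMAS AND PROOFS =====

theorem pvCountLoop_ge : ∀ (fuel : Nat) (n count : Int), count ≤ pvCountLoop fuel n count := by
  intro fuel
  induction fuel with
  | zero => intro n c; simp [pvCountLoop]
  | succ f ih =>
    intro n c
    rw [pvCountLoop]
    by_cases hn : 0 < n
    · rw [if_pos hn]
      have := ih (PySem.Int.floordiv n 10) (c + 1)
      omega
    · rw [if_neg hn]

theorem pvCountDigits_nonneg (n : Int) : 0 ≤ pvCountDigits n := pvCountLoop_ge _ _ _

theorem pvCountDigits_nonpos (n : Int) (h : n ≤ 0) : pvCountDigits n = 0 := by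
  rw [pvCountDigits]
  have ht : n.toNat = 0 := by omega
  rw [ht, pvCountLoop]

theorem pvCountDigits_pos (n : Int) (h : 1 ≤ n) : 1 ≤ pvCountDigits n := by
  rw [pvCountDigits]
  have ht : ∃ f, n.toNat = f + 1 := ⟨n.toNat - 1, by omega⟩
  obtain ⟨f, hf⟩ := ht
  rw [hf, pvCountLoop, if_pos (show 0 < n by omega)]
  exact pvCountLoop_ge _ _ _

theorem pvCountLoop_zero (fuel : Nat) (c : Int) : pvCountLoop fuel 0 c = c := by
  cases fuel with
  | zero => rfl
  | succ f => rw [pvCountLoop]; norm_num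

theorem pvCountLoop_digits (k : ℕ) : ∀ (fuel : ℕ) (n c : Int), n.toNat ≤ fuel →
    10 ^ k ≤ n → n < 10 ^ (k + 1) → pvCountLoop fuel n c = (k : Int) + 1 + c := by
  induction k with
  | zero =>
    intro fuel n c hfuel h1 h2
    have h1' : (1:Int) ≤ n := by simpa using h1
    have h2' : n < 10 := by simpa using h2
    obtain ⟨f, hf⟩ : ∃ f, fuel = f + 1 := ⟨fuel - 1, by omega⟩
    subst hf
    rw [pvCountLoop, if_pos (show 0 < n by omega),
      PySem.Int.floordiv_eq_ediv_of_pos (by norm_num), show n / 10 = 0 by omega,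
      pvCountLoop_zero]

    omega
  | succ k ih =>
    intro fuel n c hfuel h1 h2
    have hpow : (1:Int) ≤ 10 ^ (k + 1) := one_le_pow₀ (by norm_num)
    have hn : 0 < n := by omega
    obtain ⟨f, hf⟩ : ∃ f, fuel = f + 1 := ⟨fuel - 1, by omega⟩
    subst hf
    rw [pvCountLoop, if_pos hn, PySem.Int.floordiv_eq_ediv_of_pos (by norm_num)]
    have hlo : (10:Int) ^ k ≤ n / 10 := by
      rw [Int.le_ediv_iff_mul_le (by norm_num)]
      calc (10:Int) ^ k * 10 = 10 ^ (k + 1) := by ring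
        _ ≤ n := h1
    have hhi : n / 10 < 10 ^ (k + 1) := by
      rw [Int.ediv_lt_iff_lt_mul (by norm_num)]
      calc n < 10 ^ (k + 2) := h2
        _ = 10 ^ (k + 1) * 10 := by ring
    have hfu : (n / 10).toNat ≤ f := by omega
    rw [ih f (n / 10) (c + 1) hfu hlo hhi]
    push_cast
    ring

theorem pvCountDigits_eq (k : ℕ) (n : Int) (h1 : 10 ^ k ≤ n) (h2 : n < 10 ^ (k + 1)) :
    pvCountDigits n = (k : Int) + 1 := by
  rw [pvCountDigits, pvCountLoop_digits k n.toNat n 0 le_rfl h1 h2]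
  ring

-- Reference (fuel-free) form of A's loop, used only by the proofs below.
theorem pvARef_dec (current numberOfDigits : Int)
    (h : pvCountDigits current ≤ numberOfDigits) :
    (numberOfDigits - pvCountDigits current + 1).toNat + (1 - (current + 1)).toNat <
      (numberOfDigits + 1).toNat + (1 - current).toNat := by
  by_cases hc : 1 ≤ current
  · have h1 := pvCountDigits_pos current hc
    omega
  · have h0 := pvCountDigits_nonpos current (by omega)
    omega

def pvARef (current : Int) (numberOfDigits : Int) : Int :=
  if pvCountDigits current ≤ numberOfDigits then
    pvARef (current + 1) (numberOfDigits - pvCountDigits current)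
  else current - 1
termination_by (numberOfDigits + 1).toNat + (1 - current).toNat
decreasing_by exact pvARef_dec current numberOfDigits ‹_›

theorem pvALoop_eq_ref : ∀ (fuel : Nat) (current nd : Int),
    (nd + 1).toNat + (1 - current).toNat ≤ fuel →
    pvALoop fuel current nd = pvARef current nd := by
  intro fuel
  induction fuel with
  | zero =>
    intro current nd h
    have hnd : nd < 0 := by omega
    rw [pvALoop, pvARef,
      if_neg (show ¬ pvCountDigits current ≤ nd by have := pvCountDigits_nonneg current; omega)]
  | succ f ih =>
    intro current nd h
    rw [pvALoop, pvARef]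
    by_cases hc : pvCountDigits current ≤ nd
    · rw [if_pos hc, if_pos hc]
      exact ih _ _ (by have := pvARef_dec current nd hc; omega)
    · rw [if_neg hc, if_neg hc]

-- A's page-by-page loop crosses an equal-digit-length range in bulk.
theorem pvARef_block (k : ℕ) : ∀ (n nd d p : Int), 0 ≤ nd → 1 ≤ d → p - n = (k : Int) →
    (∀ m : Int, n ≤ m → m < p → pvCountDigits m = d) →
    pvARef n nd =
      if nd < d * (p - n) then n + PySem.Int.floordiv nd d - 1
      else pvARef p (nd - d * (p - n)) := by
  induction k with
  | zero =>
    intro n nd d p hnd hd hpn _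
    have hp : p = n := by omega
    subst hp
    have h0 : d * (p - p) = 0 := by ring
    rw [h0, if_neg (show ¬ nd < 0 by omega), sub_zero]
  | succ k ih =>
    intro n nd d p hnd hd hpn hdig
    have hnp : n < p := by omega
    have hdn : pvCountDigits n = d := hdig n le_rfl hnp
    have hfd : ∀ a : Int, PySem.Int.floordiv a d = a / d := fun a =>
      PySem.Int.floordiv_eq_ediv_of_pos (by omega)
    rw [pvARef, hdn]
    have hmono : d * (p - n - 1) = d * (p - n) - d := by ring
    by_cases hc : d ≤ nd
    · simp only [if_pos hc]
      rw [ih (n + 1) (nd - d) d p (by omega) hd (by omega)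
        (fun m hm1 hm2 => hdig m (by omega) hm2)]
      have hsub : p - (n + 1) = p - n - 1 := by ring
      rw [hsub, hmono]
      by_cases hlt : nd < d * (p - n)
      · rw [if_pos (by omega), if_pos hlt]
        have hdiv : (nd - d) / d = nd / d - 1 := by
          have := Int.add_mul_ediv_right nd (-1) (show d ≠ 0 by omega)
          have he : nd + (-1) * d = nd - d := by ring
          rw [he] at this
          omega
        rw [hfd, hfd, hdiv]
        ring
      · rw [if_neg (by omega), if_neg hlt]
        congr 1
        ring
    · simp only [if_neg hc]
      have hge : d ≤ d * (p - n) := by nlinarith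
      rw [if_pos (by omega)]
      have hz : nd / d = 0 := Int.ediv_eq_zero_of_lt (by omega) (by omega)
      rw [hfd, hz]
      ring

theorem pvBlock_cost_pos (current nd d p : Int) (hd : 1 ≤ d) (hcp : ¬ p ≤ current)
    (hge : ¬ nd < d * (p - current)) : 1 ≤ d * (p - current) := by
  have h2 := mul_le_mul hd (show (1:Int) ≤ p - current by omega) (by omega)
    (show (0:Int) ≤ d by omega)
  simpa using h2

-- B's block loop agrees with A's loop under its invariant, given sufficient fuel.
theorem pvBlockLoop_eq : ∀ (fuel : Nat) (current nd d p : Int), 1 ≤ d → 1 ≤ p → 0 ≤ nd →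
    (current + 1 - p).toNat + nd.toNat < fuel →
    p = 10 ^ (d - 1).toNat * 10 → 10 ^ (d - 1).toNat ≤ current →
    pvBlockLoop fuel current nd d p = pvARef current nd := by
  intro fuel
  induction fuel with
  | zero => intro current nd d p _ _ _ h; omega
  | succ f ih =>
    intro current nd d p hd hp hnd hfuel hpval hcur
    have ht : (d + 1 - 1).toNat = (d - 1).toNat + 1 := by omega
    rw [pvBlockLoop]
    by_cases hcp : p ≤ current
    · rw [if_pos hcp]
      apply ih current nd (d + 1) (p * 10) (by omega) (by omega) hnd (by omega)
      · rw [ht, pow_succ, hpval]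
      · rw [ht, pow_succ, ← hpval]; omega
    · rw [if_neg hcp]
      have hdig : ∀ m : Int, current ≤ m → m < p → pvCountDigits m = d := by
        intro m hm1 hm2
        have := pvCountDigits_eq (d - 1).toNat m (by omega)
          (by rw [← pow_succ] at hpval; omega)
        rw [this]
        omega
      by_cases hlt : nd < d * (p - current)
      · rw [if_pos hlt,
          pvARef_block (p - current).toNat current nd d p hnd hd (by omega) hdig,
          if_pos hlt]
      · rw [if_neg hlt,
          pvARef_block (p - current).toNat current nd d p hnd hd (by omega) hdig,
          if_neg hlt]
        have hcost := pvBlock_cost_pos current nd d p hd hcp hlt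
        apply ih p (nd - d * (p - current)) (d + 1) (p * 10) (by omega) (by omega)
          (by omega) (by omega)
        · rw [ht, pow_succ, hpval]
        · rw [ht, pow_succ, ← hpval]

-- ===== VERDICT (by name: the statement is the Claim_ definition above) =====
theorem pagesNumberingWithInk_spec : Claim_equal_pagesNumberingWithInk := by
  unfold Claim_equal_pagesNumberingWithInk
  intro current nd _ hpre
  unfold Spec_pagesNumberingWithInk pagesNumberingWithInk pagesNumberingWithInk_alt
  unfold Pre_pagesNumberingWithInk at hpre
  rw [pvALoop_eq_ref _ current nd le_rfl]
  by_cases hneg : nd < 0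
  · rw [if_pos hneg, pvARef]
    have := pvCountDigits_pos current hpre
    rw [if_neg (by omega)]
  · rw [if_neg hneg,
      pvBlockLoop_eq _ current nd 1 10 (by norm_num) (by norm_num) (by omega) (by omega)
        (by norm_num) (by simpa using hpre)]
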